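-- pv_equiv track=rewrite | github.com/Chetanmkp/rag_model | rag-llm_query.py | find_most_relevant_chunk
-- ===== SOURCE A (Python) =====
-- def find_most_relevant_chunk(chunks, question):
--     question_words = set(question.lower().split())
--     best_chunk = ""
--     max_matches = 0
--     for chunk in chunks:
--         matches = sum(1 for word in question_words if word in chunk.lower())
--         if matches > max_matches:
--             max_matches = matches
--             best_chunk = chunk
--     return best_chunk
-- ===== SOURCE B (Python) =====
-- def find_most_relevant_chunk(chunks, question):
--     question_words = set(question.lower().split())
--     scores = [sum(1 for word in question_words if word in chunk.lower()) for chunk in chunks]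
--     if scores and max(scores) > 0:
--         return chunks[scores.index(max(scores))]
--     return ""
-- ===== Notes on version B (the rewrite author's own statement) =====
-- stated objective: alternative
-- what changed: Replaces the incremental best-so-far loop with a score-all-then-select decomposition: build the full score table, then pick chunks[scores.index(max(scores))] when the maximum is positive, else "".
import Mathlib
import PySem

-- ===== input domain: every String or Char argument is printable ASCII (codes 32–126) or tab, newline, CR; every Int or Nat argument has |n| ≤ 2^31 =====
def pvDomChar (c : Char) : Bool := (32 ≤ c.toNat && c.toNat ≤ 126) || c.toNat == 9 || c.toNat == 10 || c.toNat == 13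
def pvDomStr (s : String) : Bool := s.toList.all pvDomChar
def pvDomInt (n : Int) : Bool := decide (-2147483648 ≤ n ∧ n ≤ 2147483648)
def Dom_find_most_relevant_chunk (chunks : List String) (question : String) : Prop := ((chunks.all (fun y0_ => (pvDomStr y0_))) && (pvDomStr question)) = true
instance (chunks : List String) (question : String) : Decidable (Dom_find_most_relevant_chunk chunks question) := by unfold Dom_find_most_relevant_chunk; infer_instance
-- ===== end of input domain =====

-- B replaces A's incremental best-so-far loop by a score-all-then-select decomposition
-- (full score table, then chunks[scores.index(max(scores))]); alternative structure, same cost.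

-- ===== PORT A =====
def find_most_relevant_chunk (chunks : List String) (question : String) : String :=
  let question_words := PySem.Set.ofList (PySem.Str.split₀ (PySem.Str.lower question))
  (chunks.foldl (fun (st : String × Int) chunk =>
      let matches_ : Int :=
        (question_words.map (fun word =>
          if PySem.Str.isIn word (PySem.Str.lower chunk) then (1 : Int) else 0)).sum
      if matches_ > st.2 then (chunk, matches_) else st)
    ("", 0)).1

-- ===== PORT B =====
def find_most_relevant_chunk_alt (chunks : List String) (question : String) : String :=
  let question_words := PySem.Set.ofList (PySem.Str.split₀ (PySem.Str.lower question))
  let scores := chunks.map (fun chunk =>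
    (question_words.map (fun word =>
      if PySem.Str.isIn word (PySem.Str.lower chunk) then (1 : Int) else 0)).sum)
  match PySem.List.max? scores (fun x => x) with
  | none => ""
  | some m =>
    if m > 0 then
      match PySem.List.index? scores m with
      | some i => (PySem.List.pyGet? chunks (i : Int)).getD ""
      | none => ""
    else ""

-- ===== PRECONDITION & SPEC =====
def Spec_find_most_relevant_chunk (chunks : List String) (question : String) (out : String) : Prop := out = find_most_relevant_chunk_alt chunks question
instance (chunks : List String) (question : String) (out : String) : Decidable (Spec_find_most_relevant_chunk chunks question out) := by unfold Spec_find_most_relevant_chunk; infer_instance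

-- ===== CLAIM (what is proved, stated in full; the proofs are below) =====
def Claim_equal_find_most_relevant_chunk : Prop := ∀ (chunks : List String) (question : String), Dom_find_most_relevant_chunk chunks question → Spec_find_most_relevant_chunk chunks question (find_most_relevant_chunk chunks question)

-- ===== LEMMAS AND PROOFS =====

-- B's selection, abstracted over the per-chunk score function
def selB (f : String → Int) (l : List String) : String :=
  match PySem.List.max? (l.map f) (fun x => x) with
  | none => ""
  | some m =>
    if m > 0 then
      match PySem.List.index? (l.map f) m with
      | some i => (PySem.List.pyGet? l (i : Int)).getD ""
      | none => ""
    else ""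

-- A's running maximum (clamped at the initial 0), abstracted likewise
def maccB (f : String → Int) (l : List String) : Int :=
  match PySem.List.max? (l.map f) (fun x => x) with
  | none => 0
  | some m => max 0 m

lemma max?_id_append_singleton (s : List Int) (x : Int) :
    PySem.List.max? (s ++ [x]) (fun y => y) =
      some (match PySem.List.max? s (fun y => y) with | none => x | some m => max m x) := by
  cases s with
  | nil => simp [PySem.List.max?]
  | cons y t => simp [PySem.List.max?_id_cons, List.foldl_append]


lemma key (f : String → Int) (l : List String) :
    l.foldl (fun (st : String × Int) c => if f c > st.2 then (c, f c) else st) ("", 0)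
      = (selB f l, maccB f l) := by
  induction l using List.reverseRecOn with
  | nil => simp [selB, maccB, PySem.List.max?]
  | append_singleton l c ih =>
    rw [List.foldl_append, List.foldl_cons, List.foldl_nil, ih]
    unfold selB maccB
    rw [List.map_append, List.map_cons, List.map_nil, max?_id_append_singleton]
    cases h : PySem.List.max? (l.map f) (fun y => y) with
    | none =>
      have hl : l = [] := by
        have h2 := (PySem.List.max?_eq_none_iff (List.map f l) (fun y => y)).mp h
        simpa using h2
      subst hl
      simp only [List.map_nil, List.nil_append]
      rw [PySem.List.index?_cons_self]
      by_cases hx : f c > 0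
      · simp [hx, max_eq_right (le_of_lt hx)]
      · have : max 0 (f c) = 0 := by omega
        simp [hx, this]
    | some M =>
      dsimp only
      have hle : ∀ y ∈ l.map f, y ≤ M := fun y hy => PySem.List.max?_isMax h y hy
      by_cases hx : f c > max 0 M
      · -- new element strictly beats the running max: fresh maximum at the end
        have hnot : f c ∉ l.map f := fun hmem => by
          have := hle _ hmem; omega
        have hmx : max M (f c) = f c := by omega
        rw [if_pos hx, hmx, PySem.List.index?_append_singleton_self (List.map f l) (f c) hnot]
        have hget : PySem.List.pyGet? (l ++ [c]) ((l.map f).length : Int) = some c := by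
          simp only [List.length_map]
          exact PySem.List.pyGet?_append_length l [] c
        simp only [hget]
        have h0 : f c > 0 := by omega
        simp [h0, max_eq_right (le_of_lt h0)]
      · rw [if_neg hx]
        by_cases hM : f c ≤ M
        · have hmx : max M (f c) = M := by omega
          rw [hmx]
          by_cases hMp : M > 0
          · have hmem : M ∈ l.map f := PySem.List.max?_mem h
            rw [PySem.List.index?_append_of_mem [f c] hmem]
            cases hidx : PySem.List.index? (l.map f) M with
            | none =>
              exact absurd hmem ((PySem.List.index?_eq_none_iff (List.map f l) M).mp hidx)
            | some i =>
              obtain ⟨hk, _, _⟩ := PySem.List.getElem_of_index?_eq_some hidx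
              have hil : i < l.length := by simpa using hk
              have : PySem.List.pyGet? (l ++ [c]) (i : Int) = PySem.List.pyGet? l (i : Int) := by
                rw [PySem.List.pyGet?_natCast, PySem.List.pyGet?_natCast,
                    List.getElem?_append_left hil]
              simp [this, hMp]
          · simp [hMp]
        · -- f c ≤ max 0 M but f c > M forces M < 0 and f c ≤ 0
          have hM0 : M < 0 := by omega
          have hc0 : f c ≤ 0 := by omega
          have hmx : max M (f c) = f c := by omega
          rw [hmx]
          have h1 : ¬ f c > 0 := by omega
          have h2 : ¬ M > 0 := by omega
          have h3 : max 0 (f c) = 0 := by omega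
          have h4 : max 0 M = 0 := by omega
          simp [h1, h2, h3, h4]

-- ===== VERDICT (by name: the statement is the Claim_ definition above) =====
theorem find_most_relevant_chunk_spec : Claim_equal_find_most_relevant_chunk := by
  intro chunks question _
  unfold Spec_find_most_relevant_chunk
  exact congrArg Prod.fst (key (fun chunk =>
    ((PySem.Set.ofList (PySem.Str.split₀ (PySem.Str.lower question))).map (fun word =>
      if PySem.Str.isIn word (PySem.Str.lower chunk) then (1 : Int) else 0)).sum) chunks)
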